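-- pv_equiv track=rewrite | github.com/jonatanskogsfors/aoc2024 | src/aoc2024/day_09.py | next_file
-- ===== SOURCE A (Python) =====
-- def next_file(index, filesystem: list[str]):
--     subfilesystem = filesystem[: index + 1]
--     for end in reversed(range(len(subfilesystem))):
--         if subfilesystem[end] == ".":
--             continue
--         for start in reversed(range(len(subfilesystem[: end + 1]))):
--             if subfilesystem[start] != subfilesystem[end]:
--                 return start + 1, end + 1
--             elif start == 0:
--                 return start, end + 1
--     return None
-- ===== SOURCE B (Python) =====
-- def next_file(index, filesystem: list[str]):
--     sub = filesystem[: index + 1]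
--     result = None
--     pos = 0
--     while pos < len(sub):
--         run_end = pos
--         while run_end < len(sub) and sub[run_end] == sub[pos]:
--             run_end += 1
--         if sub[pos] != ".":
--             result = (pos, run_end)
--         pos = run_end
--     return result
-- ===== Notes on version B (the rewrite author's own statement) =====
-- stated objective: alternative
-- what changed: Replaces A's backward scan with nested backward run-matching by a single forward pass over maximal equal runs, keeping the last non-dot run's span in an accumulator.
import Mathlib
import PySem

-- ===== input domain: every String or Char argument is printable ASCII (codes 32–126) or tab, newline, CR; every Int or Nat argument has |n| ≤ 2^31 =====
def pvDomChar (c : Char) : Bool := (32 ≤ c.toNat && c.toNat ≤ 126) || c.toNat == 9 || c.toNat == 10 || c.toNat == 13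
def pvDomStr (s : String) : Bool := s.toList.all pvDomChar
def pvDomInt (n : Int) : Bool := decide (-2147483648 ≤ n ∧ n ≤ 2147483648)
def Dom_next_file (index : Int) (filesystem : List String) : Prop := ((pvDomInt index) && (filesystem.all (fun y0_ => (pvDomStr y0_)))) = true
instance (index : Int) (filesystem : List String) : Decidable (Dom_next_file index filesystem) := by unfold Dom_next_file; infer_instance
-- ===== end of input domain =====

-- B replaces A's backward scan (find last non-dot, then walk back over the equal run)
-- by ONE forward pass over maximal equal runs with a result accumulator. Same cost; alternative structure.

-- ===== PORT A =====
-- inner loop: 'for start in reversed(range(len(sub[:end+1])))' — since e < len sub, that range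
-- starts at e and counts down to 0; indices are always in range so getD "" is exact here.
def nfInner (sub : List String) (e : Nat) : Nat → Option (Int × Int)
  | 0 => if sub.getD 0 "" ≠ sub.getD e "" then some (1, (e : Int) + 1)
         else some (0, (e : Int) + 1)
  | s + 1 => if sub.getD (s + 1) "" ≠ sub.getD e "" then some ((s : Int) + 2, (e : Int) + 1)
             else nfInner sub e s

-- outer loop: 'for end in reversed(range(len(sub)))'; counter k means next end is k-1.
def nfOuter (sub : List String) : Nat → Option (Int × Int)
  | 0 => none
  | k + 1 => if sub.getD k "" = "." then nfOuter sub k else nfInner sub k k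

def next_file (index : Int) (filesystem : List String) : Option (Int × Int) :=
  let sub := PySem.List.slice filesystem none (some (index + 1))
  nfOuter sub sub.length

-- ===== PORT B =====
-- inner while: 'while run_end < len(sub) and sub[run_end] == sub[pos]: run_end += 1'
def runEnd (sub : List String) (v : String) (i : Nat) : Nat :=
  if h : i < sub.length ∧ sub.getD i "" = v then runEnd sub v (i + 1) else i
termination_by sub.length - i

theorem runEnd_ge (sub : List String) (v : String) (i : Nat) : i ≤ runEnd sub v i := by
  fun_induction runEnd sub v i with
  | case1 i h ih => omega
  | case2 i h => omega

-- outer while loop of Source B, carrying the result accumulator.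
def nbLoop (sub : List String) (pos : Nat) (result : Option (Int × Int)) : Option (Int × Int) :=
  if h : pos < sub.length then
    nbLoop sub (runEnd sub (sub.getD pos "") pos)
      (if sub.getD pos "" ≠ "." then some ((pos : Int), (runEnd sub (sub.getD pos "") pos : Int))
       else result)
  else result
termination_by sub.length - pos
decreasing_by
  have h1 : runEnd sub (sub.getD pos "") pos = runEnd sub (sub.getD pos "") (pos + 1) := by
    rw [runEnd]; simp [h]
  have h2 := runEnd_ge sub (sub.getD pos "") (pos + 1)
  omega

def next_file_alt (index : Int) (filesystem : List String) : Option (Int × Int) :=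
  let sub := PySem.List.slice filesystem none (some (index + 1))
  nbLoop sub 0 none

-- ===== PRECONDITION & SPEC =====
def Spec_next_file (index : Int) (filesystem : List String) (out : Option (Int × Int)) : Prop := out = next_file_alt index filesystem
instance (index : Int) (filesystem : List String) (out : Option (Int × Int)) : Decidable (Spec_next_file index filesystem out) := by unfold Spec_next_file; infer_instance

-- ===== CLAIM (what is proved, stated in full; the proofs are below) =====
def Claim_equal_next_file : Prop := ∀ (index : Int) (filesystem : List String), Dom_next_file index filesystem → Spec_next_file index filesystem (next_file index filesystem)

-- ===== LEMMAS AND PROOFS =====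

-- start of the maximal equal run ending at e, as A's inner loop computes it (scanning down from s)
def iStart (sub : List String) (e : Nat) : Nat → Nat
  | 0 => if sub.getD 0 "" ≠ sub.getD e "" then 1 else 0
  | s + 1 => if sub.getD (s + 1) "" ≠ sub.getD e "" then s + 2 else iStart sub e s

theorem nfInner_eq (sub : List String) (e s : Nat) :
    nfInner sub e s = some ((iStart sub e s : Int), (e : Int) + 1) := by
  induction s with
  | zero => simp only [nfInner, iStart]; split_ifs <;> simp
  | succ s ih =>
    simp only [nfInner, iStart]
    split_ifs with h <;> simp [ih]

theorem iStart_run (sub : List String) (e : Nat) :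
    ∀ s, (∀ j, j ≤ s → sub.getD j "" = sub.getD e "") → iStart sub e s = 0 := by
  intro s
  induction s with
  | zero => intro h; simp only [iStart]; rw [if_neg (not_not_intro (h 0 (by omega)))]
  | succ s ih =>
    intro h
    simp only [iStart]
    rw [if_neg (not_not_intro (h (s+1) (by omega)))]
    exact ih (fun j hj => h j (by omega))

theorem iStart_eq (sub : List String) (e p : Nat)
    (hb : p = 0 ∨ sub.getD (p - 1) "" ≠ sub.getD e "") :
    ∀ s, p ≤ s → (∀ j, p ≤ j → j ≤ s → sub.getD j "" = sub.getD e "") → iStart sub e s = p := by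
  intro s
  induction s with
  | zero =>
    intro hp hall
    have hp0 : p = 0 := by omega
    subst hp0
    exact iStart_run sub e 0 (fun j hj => hall j (by omega) hj)
  | succ s ih =>
    intro hp hall
    have h1 : sub.getD (s + 1) "" = sub.getD e "" := hall (s + 1) (by omega) (by omega)
    simp only [iStart]
    rw [if_neg (not_not_intro h1)]
    by_cases hps : p = s + 1
    · -- iStart descends to s, where sub[s] ≠ sub[e] stops it at s+1 = p
      rcases hb with hb | hb
      · omega
      · have hs : sub.getD s "" ≠ sub.getD e "" := by
          have hps' : p - 1 = s := by omega
          rwa [hps'] at hb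
        cases s with
        | zero => simp only [iStart]; rw [if_pos hs]; omega
        | succ s' => simp only [iStart]; rw [if_pos hs]; omega
    · exact ih (by omega) (fun j hj hjs => hall j hj (by omega))

-- A-side characterisations
theorem nfOuter_dots (sub : List String) (k : Nat)
    (h : ∀ j, j < k → sub.getD j "" = ".") : nfOuter sub k = none := by
  induction k with
  | zero => rfl
  | succ k ih =>
    simp only [nfOuter]
    rw [if_pos (h k (by omega))]
    exact ih (fun j hj => h j (by omega))

theorem nfOuter_last (sub : List String) (e : Nat) (he : sub.getD e "" ≠ ".") :
    ∀ k, e < k → (∀ j, e < j → j < k → sub.getD j "" = ".") →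
    nfOuter sub k = some ((iStart sub e e : Int), (e : Int) + 1) := by
  intro k
  induction k with
  | zero => omega
  | succ k ih =>
    intro hk hall
    by_cases hek : e = k
    · subst hek
      simp only [nfOuter]
      rw [if_neg he]
      exact nfInner_eq sub e e
    · simp only [nfOuter]
      rw [if_pos (hall k (by omega) (by omega))]
      exact ih (by omega) (fun j hj hjk => hall j hj (by omega))

-- runEnd characterisation
theorem runEnd_run (sub : List String) (v : String) (i : Nat) :
    ∀ j, i ≤ j → j < runEnd sub v i → sub.getD j "" = v := by
  fun_induction runEnd sub v i with
  | case1 i h ih =>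
    intro j hij hjr
    by_cases hji : j = i
    · subst hji; exact h.2
    · exact ih j (by omega) hjr
  | case2 i h => intro j hij hjr; omega

theorem runEnd_stop (sub : List String) (v : String) (i : Nat) :
    ¬ (runEnd sub v i < sub.length ∧ sub.getD (runEnd sub v i) "" = v) := by
  fun_induction runEnd sub v i with
  | case1 i h ih => exact ih
  | case2 i h => exact h

theorem runEnd_le (sub : List String) (v : String) (i : Nat) (h : i ≤ sub.length) :
    runEnd sub v i ≤ sub.length := by
  fun_induction runEnd sub v i with
  | case1 i h1 ih => exact ih (by omega)
  | case2 i h1 => exact h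

theorem runEnd_gt (sub : List String) (i : Nat) (h : i < sub.length) :
    i < runEnd sub (sub.getD i "") i := by
  rw [runEnd, dif_pos ⟨h, rfl⟩]
  exact Nat.lt_of_lt_of_le (Nat.lt_succ_self i) (runEnd_ge sub (sub.getD i "") (i + 1))

-- B-side characterisations
theorem nbLoop_dots (sub : List String) (pos : Nat) (res : Option (Int × Int))
    (h : ∀ j, pos ≤ j → j < sub.length → sub.getD j "" = ".") : nbLoop sub pos res = res := by
  fun_induction nbLoop sub pos res with
  | case1 pos res h1 ih =>
    have hp : sub.getD pos "" = "." := h pos (by omega) h1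
    simp only [hp, ne_eq, not_true_eq_false, if_false] at ih ⊢
    have hre : pos ≤ runEnd sub "." pos := runEnd_ge sub "." pos
    exact ih (fun j hj hjl => h j (by omega) hjl)
  | case2 pos res h1 => rfl

theorem nbLoop_last (sub : List String) (e : Nat) (he : e < sub.length)
    (hend : sub.getD e "" ≠ ".") (hafter : ∀ j, e < j → j < sub.length → sub.getD j "" = ".") :
    ∀ fuel pos res, e - pos ≤ fuel → pos ≤ e →
    (pos = 0 ∨ sub.getD (pos - 1) "" ≠ sub.getD pos "") →
    nbLoop sub pos res = some ((iStart sub e e : Int), (e : Int) + 1) := by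
  intro fuel
  induction fuel with
  | zero =>
    -- fuel 0 forces pos = e, so the current run reaches past e and the loop finishes here
    intro pos res hf hpe hb
    have hpe' : pos = e := by omega
    subst hpe'
    rw [nbLoop, dif_pos he]
    have hgt := runEnd_gt sub pos he
    have hrun := runEnd_run sub (sub.getD pos "") pos
    have hstop := runEnd_stop sub (sub.getD pos "") pos
    have hle := runEnd_le sub (sub.getD pos "") pos (by omega)
    have hre : runEnd sub (sub.getD pos "") pos = pos + 1 := by
      by_contra hne
      have h2 : pos + 1 < runEnd sub (sub.getD pos "") pos := by omega
      have h3 := hrun (pos + 1) (by omega) h2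
      have h4 := hafter (pos + 1) (by omega) (by omega)
      rw [h4] at h3
      exact hend h3.symm
    rw [if_pos hend, hre]
    have hi : iStart sub pos pos = pos := by
      apply iStart_eq sub pos pos hb pos (le_refl _)
      intro j h1 h2
      have hj : j = pos := by omega
      rw [hj]
    rw [hi]
    apply nbLoop_dots
    intro j hj hjl
    exact hafter j (by omega) hjl
  | succ fuel ih =>
    intro pos res hf hpe hb
    have hpl : pos < sub.length := by omega
    rw [nbLoop, dif_pos hpl]
    have hgt := runEnd_gt sub pos hpl
    have hrun := runEnd_run sub (sub.getD pos "") pos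
    have hstop := runEnd_stop sub (sub.getD pos "") pos
    have hle := runEnd_le sub (sub.getD pos "") pos (by omega)
    by_cases hcase : runEnd sub (sub.getD pos "") pos ≤ e
    · -- the current run ends at or before e: recurse; boundary holds at the new position
      have hbnd : runEnd sub (sub.getD pos "") pos = 0 ∨
          sub.getD (runEnd sub (sub.getD pos "") pos - 1) "" ≠
            sub.getD (runEnd sub (sub.getD pos "") pos) "" := by
        right
        have h1 : sub.getD (runEnd sub (sub.getD pos "") pos - 1) "" = sub.getD pos "" :=
          hrun _ (by omega) (by omega)
        have h2 : sub.getD (runEnd sub (sub.getD pos "") pos) "" ≠ sub.getD pos "" :=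
          fun hc => hstop ⟨by omega, hc⟩
        rw [h1]
        exact fun hc => h2 hc.symm
      split_ifs with hd
      · exact ih _ _ (by omega) hcase hbnd
      · exact ih _ _ (by omega) hcase hbnd
    · -- the current run covers e: it is the last non-dot run and ends exactly at e + 1
      have hree : e < runEnd sub (sub.getD pos "") pos := by omega
      have hev : sub.getD e "" = sub.getD pos "" := hrun e hpe hree
      have hre1 : runEnd sub (sub.getD pos "") pos = e + 1 := by
        by_contra hne
        have h2 : e + 1 < runEnd sub (sub.getD pos "") pos := by omega
        have h3 := hrun (e + 1) (by omega) h2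
        have h4 := hafter (e + 1) (by omega) (by omega)
        rw [h4] at h3
        exact hend (by rw [hev, ← h3])
      have hd : sub.getD pos "" ≠ "." := by rw [← hev]; exact hend
      rw [if_pos hd, hre1]
      have hi : iStart sub e e = pos := by
        apply iStart_eq sub e pos
        · rcases hb with hb | hb
          · exact Or.inl hb
          · right; rw [← hev] at hb; exact hb
        · exact hpe
        · intro j h1 h2
          rw [hev]
          exact hrun j h1 (by omega)
      rw [hi]
      apply nbLoop_dots
      intro j hj hjl
      exact hafter j (by omega) hjl

-- existence of the last non-dot index (or all dots)
theorem last_exists (sub : List String) :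
    ∀ n, n ≤ sub.length →
    (∀ j, j < n → sub.getD j "" = ".") ∨
    (∃ e, e < n ∧ sub.getD e "" ≠ "." ∧ ∀ j, e < j → j < n → sub.getD j "" = ".") := by
  intro n
  induction n with
  | zero => intro _; left; intro j hj; omega
  | succ n ih =>
    intro hn
    by_cases hd : sub.getD n "" = "."
    · rcases ih (by omega) with h | ⟨e, he1, he2, he3⟩
      · left; intro j hj
        by_cases hjn : j = n
        · subst hjn; exact hd
        · exact h j (by omega)
      · right; exact ⟨e, by omega, he2, fun j hj hjn => by
          by_cases hjn' : j = n
          · subst hjn'; exact hd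
          · exact he3 j hj (by omega)⟩
    · right; exact ⟨n, by omega, hd, fun j hj hjn => by omega⟩

theorem main_eq (sub : List String) : nfOuter sub sub.length = nbLoop sub 0 none := by
  rcases last_exists sub sub.length (le_refl _) with h | ⟨e, he1, he2, he3⟩
  · rw [nfOuter_dots sub sub.length h, nbLoop_dots sub 0 none (fun j _ hj => h j hj)]
  · rw [nfOuter_last sub e he2 sub.length he1 he3,
      nbLoop_last sub e he1 he2 he3 e 0 none (by omega) (by omega) (Or.inl rfl)]

-- ===== VERDICT (by name: the statement is the Claim_ definition above) =====
theorem next_file_spec : Claim_equal_next_file := by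
  intro index filesystem _
  unfold Spec_next_file next_file next_file_alt
  exact main_eq _
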